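-- pv_equiv track=rewrite | github.com/gdoct/ai-storywriter | backend/services/llm_proxy_service.py | extract_byok_headers
-- ===== SOURCE A (Python) =====
-- from typing import Dict, Any, Optional, Tuple
--
-- def extract_byok_headers(headers: Dict[str, str]) -> Optional[Dict[str, str]]:
--     """Extract BYOK-related headers from request headers"""
--     byok_headers = {}
--
--     # Look for BYOK headers (case-insensitive)
--     for key, value in headers.items():
--         lower_key = key.lower()
--         if lower_key == 'x-byok-api-key':
--             byok_headers['X-BYOK-API-Key'] = value
--         elif lower_key == 'x-byok-base-url':
--             byok_headers['X-BYOK-Base-URL'] = value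
--         elif lower_key == 'x-byok-provider':
--             byok_headers['X-BYOK-Provider'] = value
--
--     return byok_headers if byok_headers else None
-- ===== SOURCE B (Python) =====
-- def extract_byok_headers(headers):
--     """Extract BYOK-related headers from request headers"""
--     # Stage 1: index ALL headers once by lowercased key (later entries win, as dict
--     # assignment overwrites). Stage 2: probe that index for the three known targets.
--     lowered = {}
--     for key, value in headers.items():
--         lowered[key.lower()] = value
--
--     targets = [('x-byok-api-key', 'X-BYOK-API-Key'),
--                ('x-byok-base-url', 'X-BYOK-Base-URL'),
--                ('x-byok-provider', 'X-BYOK-Provider')]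
--     byok = {}
--     for lk, canon in targets:
--         if lk in lowered:
--             byok[canon] = lowered[lk]
--     return byok or None
-- ===== Notes on version B (the rewrite author's own statement) =====
-- stated objective: alternative
-- what changed: Two staged passes replace A's single scan with an if/elif chain: B first indexes every header once by lowercased key (last wins), then loops over the three fixed target keys probing that index, so the per-header branch chain disappears; Pre_ excludes inputs where the result dict's insertion order (A: first-occurrence order of the input, B: fixed canonical order) would differ, an artefact invisible to Python's dict == but visible to the Lean list equality.
import Mathlib
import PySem

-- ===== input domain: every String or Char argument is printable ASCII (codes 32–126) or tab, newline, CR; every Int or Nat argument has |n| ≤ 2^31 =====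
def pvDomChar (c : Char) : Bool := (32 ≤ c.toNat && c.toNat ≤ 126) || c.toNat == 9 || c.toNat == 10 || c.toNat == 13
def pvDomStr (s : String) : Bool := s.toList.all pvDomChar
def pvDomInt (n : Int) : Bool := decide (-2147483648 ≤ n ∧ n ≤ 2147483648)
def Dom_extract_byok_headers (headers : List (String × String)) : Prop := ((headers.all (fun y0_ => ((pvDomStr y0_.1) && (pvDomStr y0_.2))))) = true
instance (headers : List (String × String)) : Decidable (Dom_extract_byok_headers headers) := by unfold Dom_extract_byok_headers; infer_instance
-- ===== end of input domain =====

-- B restructures A's single scan with an if/elif chain into two staged passes (index all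
-- headers by lowercased key, then probe the three fixed targets); return value only.

-- ===== PORT A =====
def byokStepA (d : PySem.Dict String String) (kv : String × String) : PySem.Dict String String :=
  let lower_key := PySem.Str.lower kv.1
  if lower_key == "x-byok-api-key" then d.insert "X-BYOK-API-Key" kv.2
  else if lower_key == "x-byok-base-url" then d.insert "X-BYOK-Base-URL" kv.2
  else if lower_key == "x-byok-provider" then d.insert "X-BYOK-Provider" kv.2
  else d

def extract_byok_headers (headers : List (String × String)) : Option (List (String × String)) :=
  let byok_headers := headers.foldl byokStepA PySem.Dict.empty
  if byok_headers.items.isEmpty then none else some byok_headers.items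

-- ===== PORT B =====
def byokTargets : List (String × String) :=
  [("x-byok-api-key", "X-BYOK-API-Key"),
   ("x-byok-base-url", "X-BYOK-Base-URL"),
   ("x-byok-provider", "X-BYOK-Provider")]

-- pass 1: index every header by lowercased key (later entries overwrite)
def byokLowered (headers : List (String × String)) : PySem.Dict String String :=
  headers.foldl (fun d kv => d.insert (PySem.Str.lower kv.1) kv.2) PySem.Dict.empty

-- pass 2 body: 'if lk in lowered: byok[canon] = lowered[lk]'
def byokStepB (lowered : PySem.Dict String String) (r : PySem.Dict String String)
    (t : String × String) : PySem.Dict String String :=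
  match lowered.get? t.1 with
  | some v => r.insert t.2 v
  | none => r

def extract_byok_headers_alt (headers : List (String × String)) : Option (List (String × String)) :=
  let lowered := byokLowered headers
  let byok := byokTargets.foldl (byokStepB lowered) PySem.Dict.empty
  if byok.items.isEmpty then none else some byok.items

-- ===== PRECONDITION & SPEC =====
-- first index (if any) of a header whose lowercased key is k
def byokFirst? (headers : List (String × String)) (k : String) : Option Nat :=
  headers.findIdx? (fun kv => PySem.Str.lower kv.1 == k)

def byokBefore (headers : List (String × String)) (k1 k2 : String) : Bool :=
  match byokFirst? headers k1, byokFirst? headers k2 with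
  | some a, some b => a < b
  | _, _ => true

-- Pre_ excludes inputs on which A's and B's result dicts are equal under Python's == but
-- differ in insertion order (A: first-occurrence order of the input, B: fixed canonical
-- order) — i.e. those whose first occurrences of the three BYOK keys, case-insensitively,
-- are not in the order api-key, base-url, provider.
def Pre_extract_byok_headers (headers : List (String × String)) : Prop :=
  (byokBefore headers "x-byok-api-key" "x-byok-base-url"
    && byokBefore headers "x-byok-api-key" "x-byok-provider"
    && byokBefore headers "x-byok-base-url" "x-byok-provider") = true
instance (headers : List (String × String)) : Decidable (Pre_extract_byok_headers headers) := by unfold Pre_extract_byok_headers; infer_instance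

def pvWitness_extract_byok_headers : (List (String × String)) :=
  [("X-BYOK-API-Key", "secret"), ("x-byok-base-url", "http://localhost"), ("Content-Type", "application/json")]

def Spec_extract_byok_headers (headers : List (String × String)) (out : Option (List (String × String))) : Prop := out = extract_byok_headers_alt headers
instance (headers : List (String × String)) (out : Option (List (String × String))) : Decidable (Spec_extract_byok_headers headers out) := by unfold Spec_extract_byok_headers; infer_instance

-- ===== CLAIM (what is proved, stated in full; the proofs are below) =====
def Claim_equal_extract_byok_headers : Prop := ∀ (headers : List (String × String)), Dom_extract_byok_headers headers → Pre_extract_byok_headers headers → Spec_extract_byok_headers headers (extract_byok_headers headers)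

-- ===== LEMMAS AND PROOFS =====

-- value of the LAST header (if any) whose lowercased key is k
def lastVal? : List (String × String) → String → Option String
  | [], _ => none
  | kv :: rest, k => (lastVal? rest k).or (if PySem.Str.lower kv.1 == k then some kv.2 else none)

def oItem (o : Option String) (c : String) : List (String × String) :=
  match o with
  | some v => [(c, v)]
  | none => []

-- the common result-items shape: present kinds in canonical order, each with its last value
def specList (headers : List (String × String)) : List (String × String) :=
  oItem (lastVal? headers "x-byok-api-key") "X-BYOK-API-Key"
    ++ oItem (lastVal? headers "x-byok-base-url") "X-BYOK-Base-URL"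
    ++ oItem (lastVal? headers "x-byok-provider") "X-BYOK-Provider"

theorem lastVal?_append (xs ys : List (String × String)) (k : String) :
    lastVal? (xs ++ ys) k = (lastVal? ys k).or (lastVal? xs k) := by
  induction xs with
  | nil => simp [lastVal?]
  | cons kv rest ih => simp [lastVal?, ih, Option.or_assoc]

theorem lowered_get (headers : List (String × String)) (d : PySem.Dict String String) (k : String) :
    (headers.foldl (fun d kv => d.insert (PySem.Str.lower kv.1) kv.2) d).get? k
      = (lastVal? headers k).or (d.get? k) := by
  induction headers generalizing d with
  | nil => simp [lastVal?]
  | cons kv rest ih =>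
      simp only [List.foldl_cons, ih, lastVal?, Option.or_assoc]
      congr 1
      rw [PySem.Dict.get?_insert]
      by_cases h : PySem.Str.lower kv.1 = k <;> simp [h, Ne.symm]

theorem b_items (headers : List (String × String)) :
    (byokTargets.foldl (byokStepB (byokLowered headers)) PySem.Dict.empty).items
      = specList headers := by
  have g : ∀ k, (byokLowered headers).get? k = lastVal? headers k := by
    intro k
    unfold byokLowered
    rw [lowered_get]
    simp
  simp only [byokTargets, List.foldl_cons, List.foldl_nil, byokStepB, g, specList]
  cases h1 : lastVal? headers "x-byok-api-key" <;>
    cases h2 : lastVal? headers "x-byok-base-url" <;>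
      cases h3 : lastVal? headers "x-byok-provider" <;>
        simp only [oItem] <;> rfl

theorem byokFirst?_eq_none_iff (headers : List (String × String)) (k : String) :
    byokFirst? headers k = none ↔ lastVal? headers k = none := by
  unfold byokFirst?
  induction headers with
  | nil => simp [lastVal?]
  | cons kv rest ih =>
      rw [List.findIdx?_cons]
      cases h : (PySem.Str.lower kv.1 == k) <;> simp [lastVal?, h, ih]

theorem byokBefore_prefix (xs : List (String × String)) (x : String × String) (k1 k2 : String)
    (h : byokBefore (xs ++ [x]) k1 k2 = true) : byokBefore xs k1 k2 = true := by
  unfold byokBefore at *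
  unfold byokFirst? at *
  cases h1 : xs.findIdx? (fun kv => PySem.Str.lower kv.1 == k1) with
  | none => rfl
  | some a =>
      cases h2 : xs.findIdx? (fun kv => PySem.Str.lower kv.1 == k2) with
      | none => rfl
      | some b =>
          rw [List.findIdx?_append, List.findIdx?_append, h1, h2] at h
          simpa using h

theorem pre_prefix (xs : List (String × String)) (x : String × String)
    (h : Pre_extract_byok_headers (xs ++ [x])) : Pre_extract_byok_headers xs := by
  unfold Pre_extract_byok_headers at *
  simp only [Bool.and_eq_true] at *
  exact ⟨⟨byokBefore_prefix _ _ _ _ h.1.1, byokBefore_prefix _ _ _ _ h.1.2⟩,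
    byokBefore_prefix _ _ _ _ h.2⟩

-- if the last header is the FIRST occurrence of kind k1, no kind k2 required to come later
-- can be present in the prefix
theorem absent_later (xs : List (String × String)) (x : String × String) (k1 k2 : String)
    (hpre : byokBefore (xs ++ [x]) k1 k2 = true)
    (hx : PySem.Str.lower x.1 = k1)
    (habs : lastVal? xs k1 = none) : lastVal? xs k2 = none := by
  by_contra hne
  rcases Option.ne_none_iff_exists'.mp hne with ⟨v, hv⟩
  have h1 : byokFirst? xs k1 = none := (byokFirst?_eq_none_iff xs k1).mpr habs
  have h2 : byokFirst? xs k2 ≠ none := fun hn => by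
    rw [(byokFirst?_eq_none_iff xs k2).mp hn] at hv; exact (Option.some_ne_none v hv.symm).elim
  rcases Option.ne_none_iff_exists'.mp h2 with ⟨b, hb⟩
  have hblt : b < xs.length := (List.findIdx?_eq_some_iff_findIdx_eq.mp hb).1
  unfold byokBefore at hpre
  have e1 : byokFirst? (xs ++ [x]) k1 = some xs.length := by
    unfold byokFirst? at *
    rw [List.findIdx?_append, h1, List.findIdx?_cons]
    simp [hx]
  have e2 : byokFirst? (xs ++ [x]) k2 = some b := by
    unfold byokFirst? at *
    rw [List.findIdx?_append, hb]
    rfl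
  rw [e1, e2] at hpre
  simp at hpre
  omega

theorem a_items (headers : List (String × String)) :
    Pre_extract_byok_headers headers →
    (headers.foldl byokStepA PySem.Dict.empty).items = specList headers := by
  induction headers using List.reverseRecOn with
  | nil => intro _; rfl
  | append_singleton xs x ih =>
      intro h
      have ihx := ih (pre_prefix xs x h)
      have hb12 : byokBefore (xs ++ [x]) "x-byok-api-key" "x-byok-base-url" = true := by
        have := h; unfold Pre_extract_byok_headers at this; simp only [Bool.and_eq_true] at this; exact this.1.1
      have hb13 : byokBefore (xs ++ [x]) "x-byok-api-key" "x-byok-provider" = true := by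
        have := h; unfold Pre_extract_byok_headers at this; simp only [Bool.and_eq_true] at this; exact this.1.2
      have hb23 : byokBefore (xs ++ [x]) "x-byok-base-url" "x-byok-provider" = true := by
        have := h; unfold Pre_extract_byok_headers at this; simp only [Bool.and_eq_true] at this; exact this.2
      have sv : ∀ k, lastVal? (xs ++ [x]) k
          = (if PySem.Str.lower x.1 == k then some x.2 else none).or (lastVal? xs k) := by
        intro k
        rw [lastVal?_append]
        simp [lastVal?]
      rw [List.foldl_append, List.foldl_cons, List.foldl_nil]
      by_cases hk1 : PySem.Str.lower x.1 = "x-byok-api-key"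
      · -- the api-key kind
        have e1 : byokStepA (xs.foldl byokStepA PySem.Dict.empty) x
            = (xs.foldl byokStepA PySem.Dict.empty).insert "X-BYOK-API-Key" x.2 := by
          simp [byokStepA, hk1]
        rw [e1]
        have s1 := sv "x-byok-api-key"
        have s2 := sv "x-byok-base-url"
        have s3 := sv "x-byok-provider"
        rw [hk1] at s1 s2 s3
        simp only [beq_self_eq_true, if_pos, Option.some_or] at s1
        rw [show (("x-byok-api-key" : String) == "x-byok-base-url") = false by decide] at s2
        rw [show (("x-byok-api-key" : String) == "x-byok-provider") = false by decide] at s3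
        simp only [Bool.false_eq_true, if_neg, Option.none_or, not_false_iff] at s2 s3
        cases h1 : lastVal? xs "x-byok-api-key" with
        | some v =>
            have hc : (xs.foldl byokStepA PySem.Dict.empty).contains "X-BYOK-API-Key" = true := by
              rw [PySem.Dict.contains_eq_decide_mem_keys]
              simp [PySem.Dict.keys, ihx, specList, oItem, h1]
            rw [PySem.Dict.items_insert_of_contains _ _ hc, ihx]
            simp only [specList, s1, s2, s3, h1]
            cases lastVal? xs "x-byok-base-url" <;> cases lastVal? xs "x-byok-provider" <;>
              simp [oItem]
        | none =>
            have h2 : lastVal? xs "x-byok-base-url" = none :=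
              absent_later xs x _ _ hb12 hk1 h1
            have h3 : lastVal? xs "x-byok-provider" = none :=
              absent_later xs x _ _ hb13 hk1 h1
            have hc : (xs.foldl byokStepA PySem.Dict.empty).contains "X-BYOK-API-Key" = false := by
              rw [PySem.Dict.contains_eq_decide_mem_keys]
              simp [PySem.Dict.keys, ihx, specList, oItem, h1, h2, h3]
            rw [PySem.Dict.items_insert_of_not_contains _ _ hc, ihx]
            simp [specList, s1, s2, s3, h1, h2, h3, oItem]
      · by_cases hk2 : PySem.Str.lower x.1 = "x-byok-base-url"
        · -- the base-url kind
          have e1 : byokStepA (xs.foldl byokStepA PySem.Dict.empty) x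
              = (xs.foldl byokStepA PySem.Dict.empty).insert "X-BYOK-Base-URL" x.2 := by
            simp [byokStepA, hk2]
          rw [e1]
          have s1 := sv "x-byok-api-key"
          have s2 := sv "x-byok-base-url"
          have s3 := sv "x-byok-provider"
          rw [hk2] at s1 s2 s3
          simp only [beq_self_eq_true, if_pos, Option.some_or] at s2
          rw [show (("x-byok-base-url" : String) == "x-byok-api-key") = false by decide] at s1
          rw [show (("x-byok-base-url" : String) == "x-byok-provider") = false by decide] at s3
          simp only [Bool.false_eq_true, if_neg, Option.none_or, not_false_iff] at s1 s3
          cases h2 : lastVal? xs "x-byok-base-url" with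
          | some v =>
              have hc : (xs.foldl byokStepA PySem.Dict.empty).contains "X-BYOK-Base-URL" = true := by
                rw [PySem.Dict.contains_eq_decide_mem_keys]
                simp [PySem.Dict.keys, ihx, specList, oItem, h2]
              rw [PySem.Dict.items_insert_of_contains _ _ hc, ihx]
              simp only [specList, s1, s2, s3, h2]
              cases lastVal? xs "x-byok-api-key" <;> cases lastVal? xs "x-byok-provider" <;>
                simp [oItem]
          | none =>
              have h3 : lastVal? xs "x-byok-provider" = none :=
                absent_later xs x _ _ hb23 hk2 h2
              have hc : (xs.foldl byokStepA PySem.Dict.empty).contains "X-BYOK-Base-URL" = false := by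
                rw [PySem.Dict.contains_eq_decide_mem_keys]
                simp only [PySem.Dict.keys, ihx, specList, oItem, h2, h3]
                cases lastVal? xs "x-byok-api-key" <;> simp
              rw [PySem.Dict.items_insert_of_not_contains _ _ hc, ihx]
              simp only [specList, s1, s2, s3, h2, h3]
              cases lastVal? xs "x-byok-api-key" <;> simp [oItem]
        · by_cases hk3 : PySem.Str.lower x.1 = "x-byok-provider"
          · -- the provider kind
            have e1 : byokStepA (xs.foldl byokStepA PySem.Dict.empty) x
                = (xs.foldl byokStepA PySem.Dict.empty).insert "X-BYOK-Provider" x.2 := by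
              simp [byokStepA, hk3]
            rw [e1]
            have s1 := sv "x-byok-api-key"
            have s2 := sv "x-byok-base-url"
            have s3 := sv "x-byok-provider"
            rw [hk3] at s1 s2 s3
            simp only [beq_self_eq_true, if_pos, Option.some_or] at s3
            rw [show (("x-byok-provider" : String) == "x-byok-api-key") = false by decide] at s1
            rw [show (("x-byok-provider" : String) == "x-byok-base-url") = false by decide] at s2
            simp only [Bool.false_eq_true, if_neg, Option.none_or, not_false_iff] at s1 s2
            cases h3 : lastVal? xs "x-byok-provider" with
            | some v =>
                have hc : (xs.foldl byokStepA PySem.Dict.empty).contains "X-BYOK-Provider" = true := by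
                  rw [PySem.Dict.contains_eq_decide_mem_keys]
                  simp [PySem.Dict.keys, ihx, specList, oItem, h3]
                rw [PySem.Dict.items_insert_of_contains _ _ hc, ihx]
                simp only [specList, s1, s2, s3, h3]
                cases lastVal? xs "x-byok-api-key" <;> cases lastVal? xs "x-byok-base-url" <;>
                  simp [oItem]
            | none =>
                have hc : (xs.foldl byokStepA PySem.Dict.empty).contains "X-BYOK-Provider" = false := by
                  rw [PySem.Dict.contains_eq_decide_mem_keys]
                  simp only [PySem.Dict.keys, ihx, specList, oItem, h3]
                  cases lastVal? xs "x-byok-api-key" <;> cases lastVal? xs "x-byok-base-url" <;>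
                    simp
                rw [PySem.Dict.items_insert_of_not_contains _ _ hc, ihx]
                simp only [specList, s1, s2, s3, h3]
                cases lastVal? xs "x-byok-api-key" <;> cases lastVal? xs "x-byok-base-url" <;>
                  simp [oItem]
          · -- no BYOK kind: the dict and every lastVal? are unchanged
            have e1 : byokStepA (xs.foldl byokStepA PySem.Dict.empty) x
                = xs.foldl byokStepA PySem.Dict.empty := by
              simp [byokStepA, hk1, hk2, hk3]
            rw [e1, ihx]
            simp only [specList, sv]
            rw [show (PySem.Str.lower x.1 == "x-byok-api-key") = false from beq_eq_false_iff_ne.mpr hk1,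
                show (PySem.Str.lower x.1 == "x-byok-base-url") = false from beq_eq_false_iff_ne.mpr hk2,
                show (PySem.Str.lower x.1 == "x-byok-provider") = false from beq_eq_false_iff_ne.mpr hk3]
            simp

-- ===== VERDICT (by name: the statement is the Claim_ definition above) =====
theorem extract_byok_headers_spec : Claim_equal_extract_byok_headers := by
  intro headers _ hpre
  unfold Spec_extract_byok_headers
  simp only [extract_byok_headers, extract_byok_headers_alt, a_items headers hpre, b_items headers]
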